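-- pv_equiv track=rewrite | github.com/prayagatwork/ICPC | ICPC/z.py | minimum_cost_to_buy_items
-- ===== SOURCE A (Python) =====
-- def minimum_cost_to_buy_items(test_cases):
--     results = []
--
--     for n, k, prices in test_cases:
--         # Sort prices in ascending order
--         prices.sort()
--
--         # Create an array to store minimum costs for buying m items
--         min_costs = [0] * (n + 1)
--
--         # Calculate minimum costs for each m (1 to n)
--         for m in range(1, n + 1):
--             if m <= k:
--                 # If m is less than or equal to k, we just buy them all
--                 min_costs[m] = sum(prices[:m])
--             else:
--                 # Calculate cost considering groups of k + 1
--                 full_groups = m // (k + 1)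
--                 remaining_items = m % (k + 1)
--
--                 # Cost from full groups
--                 cost_from_full_groups = full_groups * sum(prices[:k])
--
--                 # Cost from remaining items
--                 cost_from_remaining = sum(prices[:remaining_items])
--
--                 # Total cost is the sum of both parts
--                 min_costs[m] = cost_from_full_groups + cost_from_remaining
--
--         results.append(min_costs[1:])  # Return results for 1 to n items
--
--     return results
-- ===== SOURCE B (Python) =====
-- def _solve(n, k, prices):
--     # sort once, build prefix sums once, answer each m in O(1)
--     prices.sort()
--     prefix = [0]
--     s = 0
--     for p in prices:
--         s += p
--         prefix.append(s)
--     row = []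
--     for m in range(1, n + 1):
--         if m <= k:
--             row.append(prefix[m])
--         else:
--             q, r = divmod(m, k + 1)
--             row.append(q * prefix[k] + prefix[r])
--     return row
--
--
-- def minimum_cost_to_buy_items(test_cases):
--     return [_solve(n, k, prices) for n, k, prices in test_cases]
-- ===== Notes on version B (the rewrite author's own statement) =====
-- stated objective: faster
-- what changed: B builds the prefix sums of the sorted prices once per test case and answers each m by O(1) table lookups, replacing A's re-summation sum(prices[:m]) inside the m-loop; Pre_ excludes test cases with a negative group size k or with fewer prices than both k and n, where A raises ZeroDivisionError (k = -1) or returns artifacts of Python's slice clamping / negative slice bounds while B's plain prefix-table indexing raises IndexError or indexes from the end.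
-- outside the precondition, e.g. on minimum_cost_to_buy_items([(2, 5, [1])]): A returns [[1, 1]], B raises IndexError; on minimum_cost_to_buy_items([(2, -3, [1, 2, 3])]): A returns [[3, 0]], B returns [[5, -1]]
import Mathlib
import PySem

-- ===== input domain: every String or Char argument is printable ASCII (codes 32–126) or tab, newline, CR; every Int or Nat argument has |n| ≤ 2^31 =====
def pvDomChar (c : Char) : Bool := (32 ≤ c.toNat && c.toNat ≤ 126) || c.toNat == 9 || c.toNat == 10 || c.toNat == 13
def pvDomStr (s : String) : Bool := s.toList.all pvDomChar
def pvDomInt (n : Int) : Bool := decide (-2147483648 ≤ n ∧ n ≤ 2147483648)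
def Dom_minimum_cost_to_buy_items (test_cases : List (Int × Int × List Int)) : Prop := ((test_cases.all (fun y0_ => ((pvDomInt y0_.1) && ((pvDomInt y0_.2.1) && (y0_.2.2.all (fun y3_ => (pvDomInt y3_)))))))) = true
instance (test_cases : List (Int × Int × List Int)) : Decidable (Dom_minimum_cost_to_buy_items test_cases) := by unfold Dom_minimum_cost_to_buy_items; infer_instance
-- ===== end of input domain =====

-- B replaces A's per-m re-summation sum(prices[:m]) by a prefix-sum table built once per
-- test case (O(n+len) instead of O(n*len) after the sort). Both Pythons sort `prices` in
-- place (same mutation); the equivalence proved here is about the return value.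

-- ===== PORT A =====
def pvCaseA (tc : Int × Int × List Int) : List Int :=
  let n := tc.1
  let k := tc.2.1
  let prices := PySem.List.sorted tc.2.2 (fun x => x) false
  let min_costs : List Int := List.replicate (n + 1).toNat 0
  let min_costs := (PySem.List.pyRange 1 (n + 1) 1).foldl (fun mc m =>
      if m ≤ k then
        mc.set m.toNat (PySem.List.slice prices none (some m)).sum
      else
        let full_groups := PySem.Int.floordiv m (k + 1)
        let remaining_items := PySem.Int.mod m (k + 1)
        let cost_from_full_groups := full_groups * (PySem.List.slice prices none (some k)).sum
        let cost_from_remaining := (PySem.List.slice prices none (some remaining_items)).sum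
        mc.set m.toNat (cost_from_full_groups + cost_from_remaining)) min_costs
  PySem.List.slice min_costs (some 1) none

def minimum_cost_to_buy_items (test_cases : List (Int × Int × List Int)) : List (List Int) :=
  test_cases.foldl (fun results tc => results ++ [pvCaseA tc]) []

-- ===== PORT B =====
def pvPrefixB (prices : List Int) : List Int :=
  (prices.foldl (fun (st : List Int × Int) p => (st.1 ++ [st.2 + p], st.2 + p)) ([0], 0)).1

def pvCaseB (tc : Int × Int × List Int) : List Int :=
  let n := tc.1
  let k := tc.2.1
  let prices := PySem.List.sorted tc.2.2 (fun x => x) false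
  let pre := pvPrefixB prices
  (PySem.List.pyRange 1 (n + 1) 1).foldl (fun row m =>
      if m ≤ k then
        row ++ [PySem.List.pyGetD pre m 0]
      else
        let q := PySem.Int.floordiv m (k + 1)
        let r := PySem.Int.mod m (k + 1)
        row ++ [q * PySem.List.pyGetD pre k 0 + PySem.List.pyGetD pre r 0]) []

def minimum_cost_to_buy_items_alt (test_cases : List (Int × Int × List Int)) : List (List Int) :=
  test_cases.map pvCaseB

-- ===== PRECONDITION & SPEC =====
-- Pre_ restricts each test case to the problem's natural domain: whenever the m-loop runs
-- (n ≥ 1), there are at least n prices and k is nonnegative. Outside it A raises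
-- ZeroDivisionError (k = -1) or returns values that are artifacts of Python slice
-- clamping / negative slice bounds, where B's plain prefix-table indexing raises
-- IndexError or indexes from the end.
def Pre_minimum_cost_to_buy_items (test_cases : List (Int × Int × List Int)) : Prop :=
  ∀ tc ∈ test_cases, tc.1 ≤ 0 ∨ (0 ≤ tc.2.1 ∧ (tc.2.1 ≤ (tc.2.2.length : Int) ∨ tc.1 ≤ (tc.2.2.length : Int)))

instance (test_cases : List (Int × Int × List Int)) : Decidable (Pre_minimum_cost_to_buy_items test_cases) := by
  unfold Pre_minimum_cost_to_buy_items; infer_instance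

def pvWitness_minimum_cost_to_buy_items : (List (Int × Int × List Int)) := [(3, 1, [2, 5, 1])]

def Spec_minimum_cost_to_buy_items (test_cases : List (Int × Int × List Int)) (out : List (List Int)) : Prop := out = minimum_cost_to_buy_items_alt test_cases
instance (test_cases : List (Int × Int × List Int)) (out : List (List Int)) : Decidable (Spec_minimum_cost_to_buy_items test_cases out) := by unfold Spec_minimum_cost_to_buy_items; infer_instance

-- ===== CLAIM (what is proved, stated in full; the proofs are below) =====
def Claim_equal_minimum_cost_to_buy_items : Prop := ∀ (test_cases : List (Int × Int × List Int)), Dom_minimum_cost_to_buy_items test_cases → Pre_minimum_cost_to_buy_items test_cases → Spec_minimum_cost_to_buy_items test_cases (minimum_cost_to_buy_items test_cases)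

-- ===== LEMMAS AND PROOFS =====

theorem pvPrefixB_fold (xs : List Int) : ∀ (acc : List Int) (s : Int),
    xs.foldl (fun (st : List Int × Int) p => (st.1 ++ [st.2 + p], st.2 + p)) (acc, s)
      = (acc ++ (List.range xs.length).map (fun i => s + (xs.take (i + 1)).sum), s + xs.sum) := by
  induction xs with
  | nil => intro acc s; simp
  | cons x xs ih =>
    intro acc s
    simp only [List.foldl_cons]
    rw [ih]
    simp [List.range_succ_eq_map, List.map_map, Function.comp, List.take_succ_cons, add_assoc]

theorem pvPrefixB_char (xs : List Int) :
    pvPrefixB xs = (List.range (xs.length + 1)).map (fun i => (xs.take i).sum) := by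
  unfold pvPrefixB
  rw [pvPrefixB_fold]
  simp [List.range_succ_eq_map, List.map_map, Function.comp]

theorem getD_pvPrefixB (xs : List Int) (j : Nat) (hj : j ≤ xs.length) :
    (pvPrefixB xs).getD j 0 = (xs.take j).sum := by
  rw [pvPrefixB_char, PySem.List.getD_map_range]
  simp [Nat.lt_succ_of_le hj]

theorem pyGetD_pvPrefixB (xs : List Int) (i : Int) (h0 : 0 ≤ i) (hL : i ≤ (xs.length : Int)) :
    PySem.List.pyGetD (pvPrefixB xs) i 0 = (PySem.List.slice xs none (some i)).sum := by
  rw [PySem.List.slice_to xs h0]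
  rw [show i = ((i.toNat : Nat) : Int) by omega, PySem.List.pyGetD_natCast]
  exact getD_pvPrefixB xs i.toNat (by omega)

theorem fold_set (g : Int → Int) : ∀ (n : Nat) (a b : Int) (init : List Int), 0 ≤ a → a ≤ b →
    b ≤ (init.length : Int) → n = (b - a).toNat →
    (PySem.List.pyRange a b 1).foldl (fun mc m => mc.set m.toNat (g m)) init
      = init.take a.toNat ++ (PySem.List.pyRange a b 1).map g ++ init.drop b.toNat := by
  intro n
  induction n with
  | zero =>
    intro a b init h0 hab hb hn
    have hba : b = a := by omega
    subst hba
    rw [PySem.List.pyRange_one_eq_nil (le_refl b)]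
    simp
  | succ n ih =>
    intro a b init h0 hab hb hn
    have hlt : a < b := by omega
    have halen : a.toNat < init.length := by omega
    rw [PySem.List.pyRange_one_cons hlt]
    simp only [List.foldl_cons, List.map_cons]
    rw [ih (a+1) b (init.set a.toNat (g a)) (by omega) (by omega) (by simp; omega) (by omega)]
    rw [List.set_eq_take_append_cons_drop, if_pos halen]
    have h1 : (a+1).toNat = a.toNat + 1 := by omega
    have htake : ((init.take a.toNat ++ g a :: init.drop (a.toNat + 1)).take (a.toNat + 1))
        = init.take a.toNat ++ [g a] := by
      rw [List.take_append]
      simp [List.length_take, Nat.min_eq_left (le_of_lt halen), List.take_succ_cons]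
    have hdrop : ((init.take a.toNat ++ g a :: init.drop (a.toNat + 1)).drop b.toNat)
        = init.drop b.toNat := by
      rw [List.drop_append]
      have hlt' : a.toNat + 1 ≤ b.toNat := by omega
      have e1 : List.drop b.toNat (List.take a.toNat init) = [] :=
        List.drop_eq_nil_of_le (by simp [List.length_take]; omega)
      have e2 : b.toNat - (List.take a.toNat init).length = (b.toNat - a.toNat - 1) + 1 := by
        simp [List.length_take]; omega
      rw [e1, e2, List.drop_succ_cons, List.drop_drop]
      simp
      congr 1
      omega
    rw [h1, htake, hdrop, List.append_assoc, List.append_assoc]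
    simp

theorem case_eq (n k : Int) (ps : List Int)
    (hpre : n ≤ 0 ∨ (0 ≤ k ∧ (k ≤ (ps.length : Int) ∨ n ≤ (ps.length : Int)))) :
    pvCaseA (n, k, ps) = pvCaseB (n, k, ps) := by
  unfold pvCaseA pvCaseB
  simp only
  set prices := PySem.List.sorted ps (fun x => x) false with hps
  have hlen : (prices.length : Int) = (ps.length : Int) := by
    simp [hps, PySem.List.length_sorted]
  rcases le_or_gt n 0 with hn | hn
  · rw [PySem.List.pyRange_one_eq_nil (by omega : n + 1 ≤ 1)]
    simp only [List.foldl_nil]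
    rw [PySem.List.slice_from _ (by norm_num : (0:Int) ≤ 1)]
    apply List.drop_eq_nil_of_le
    simp; omega
  · obtain ⟨hk, hkL⟩ : 0 ≤ k ∧ (k ≤ (prices.length : Int) ∨ n ≤ (prices.length : Int)) := by
      rcases hpre with h | ⟨h1, h2⟩
      · omega
      · exact ⟨h1, by omega⟩
    set g : Int → Int := fun m =>
      if m ≤ k then (PySem.List.slice prices none (some m)).sum
      else PySem.Int.floordiv m (k+1) * (PySem.List.slice prices none (some k)).sum +
           (PySem.List.slice prices none (some (PySem.Int.mod m (k+1)))).sum with hg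
    have hA : (fun (mc : List Int) (m : Int) =>
        if m ≤ k then mc.set m.toNat (PySem.List.slice prices none (some m)).sum
        else mc.set m.toNat (PySem.Int.floordiv m (k+1) * (PySem.List.slice prices none (some k)).sum + (PySem.List.slice prices none (some (PySem.Int.mod m (k+1)))).sum))
        = fun mc m => mc.set m.toNat (g m) := by
      funext mc m; by_cases h : m ≤ k <;> simp [hg, h]
    rw [hA, fold_set g n.toNat 1 (n+1) _ (by norm_num) (by omega) (by simp only [List.length_replicate]; omega) (by omega)]
    have h1 : (1:Int).toNat = 1 := rfl
    have htk : (List.replicate (n+1).toNat (0:Int)).take 1 = [0] := by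
      rw [List.take_replicate]
      have : min 1 (n+1).toNat = 1 := by omega
      rw [this]; rfl
    have hdp : (List.replicate (n+1).toNat (0:Int)).drop (n+1).toNat = [] := by
      simp
    rw [h1, htk, hdp, List.append_nil]
    rw [PySem.List.slice_from _ (by norm_num : (0:Int) ≤ 1)]
    set gB : Int → Int := fun m =>
      if m ≤ k then PySem.List.pyGetD (pvPrefixB prices) m 0
      else PySem.Int.floordiv m (k+1) * PySem.List.pyGetD (pvPrefixB prices) k 0 +
           PySem.List.pyGetD (pvPrefixB prices) (PySem.Int.mod m (k+1)) 0 with hgB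
    have hB : (fun (row : List Int) (m : Int) =>
        if m ≤ k then row ++ [PySem.List.pyGetD (pvPrefixB prices) m 0]
        else row ++ [PySem.Int.floordiv m (k+1) * PySem.List.pyGetD (pvPrefixB prices) k 0 +
             PySem.List.pyGetD (pvPrefixB prices) (PySem.Int.mod m (k+1)) 0])
        = fun row m => row ++ [gB m] := by
      funext row m; by_cases h : m ≤ k <;> simp [hgB, h]
    rw [hB, PySem.List.foldl_append_singleton_eq_map]
    simp only [h1, List.singleton_append, List.drop_succ_cons, List.drop_zero]
    apply List.map_congr_left
    intro m hm
    rw [PySem.List.mem_pyRange_one] at hm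
    by_cases hmk : m ≤ k
    · simp only [hg, hgB, if_pos hmk]
      rw [pyGetD_pvPrefixB prices m (by omega) (by omega)]
    · simp only [hg, hgB, if_neg hmk]
      have hr0 : 0 ≤ PySem.Int.mod m (k+1) ∧ PySem.Int.mod m (k+1) < k + 1 := by
        rw [PySem.Int.mod_eq_emod_of_pos (by omega : (0:Int) < k+1)]
        constructor
        · exact Int.emod_nonneg m (by omega)
        · exact Int.emod_lt_of_pos m (by omega)
      rw [pyGetD_pvPrefixB prices k (by omega) (by omega),
          pyGetD_pvPrefixB prices (PySem.Int.mod m (k+1)) (by omega) (by omega)]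

-- ===== VERDICT (by name: the statement is the Claim_ definition above) =====
theorem minimum_cost_to_buy_items_spec : Claim_equal_minimum_cost_to_buy_items := by
  intro tcs _ hpre
  unfold Spec_minimum_cost_to_buy_items minimum_cost_to_buy_items minimum_cost_to_buy_items_alt
  rw [PySem.List.foldl_append_singleton_eq_map]
  refine List.map_congr_left (fun tc htc => ?_)
  obtain ⟨n, k, ps⟩ := tc
  exact case_eq n k ps (hpre _ htc)
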